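-- pv_equiv track=rewrite | github.com/DeltaSierra4/DS4codeSamples | 3- Other Coding Samples/reinforcedMachineLearning/NIM game/nimgame.py | refine_game_history
-- ===== SOURCE A (Python) =====
-- def refine_game_history(game_history):
--     refined_game_list = []
--     """
--         The logic behind this function:
--         If there is an odd number of states in the game history, then player 1 won since they took the last object
--         If there is an even number of states in the game history, then player 2 won since they took the last object
--         The -1 from length adjusts for the initial state, which shouldn't count for number of moves
--     """
--     victor_flag = ((len(game_history) - 1) % 2 == 1)
--
--     for i in range(1, len(game_history)):
--         init_state = game_history[i - 1]
--         next_state = game_history[i]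
--         refined_game_list.append((init_state, next_state, victor_flag))
--         victor_flag = not victor_flag
--     return refined_game_list
-- ===== SOURCE B (Python) =====
-- def refine_game_history(game_history):
--     # Build back-to-front: the final move's winner flag is always True (the
--     # player who took the last object won), and flags alternate towards the
--     # start, so no length-parity or initial flag needs to be computed.
--     pairs = list(zip(game_history, game_history[1:]))
--     out = []
--     flag = True
--     for a, b in reversed(pairs):
--         out.append((a, b, flag))
--         flag = not flag
--     out.reverse()
--     return out
-- ===== Notes on version B (the rewrite author's own statement) =====
-- stated objective: alternative
-- what changed: Instead of computing an initial parity flag and toggling it across an index loop, B zips consecutive states into pairs and builds the result back-to-front from the invariant that the last move's flag is always True, then reverses; no length-parity is computed.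
import Mathlib
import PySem

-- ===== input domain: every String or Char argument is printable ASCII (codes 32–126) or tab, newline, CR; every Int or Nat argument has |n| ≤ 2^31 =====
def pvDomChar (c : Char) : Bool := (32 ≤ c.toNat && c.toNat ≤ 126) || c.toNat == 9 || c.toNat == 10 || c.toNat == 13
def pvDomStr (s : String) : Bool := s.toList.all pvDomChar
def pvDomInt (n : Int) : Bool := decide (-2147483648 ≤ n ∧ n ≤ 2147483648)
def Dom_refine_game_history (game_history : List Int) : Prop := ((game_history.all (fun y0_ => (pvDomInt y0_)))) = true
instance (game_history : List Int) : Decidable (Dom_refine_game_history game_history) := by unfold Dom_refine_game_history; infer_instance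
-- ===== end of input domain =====

-- B builds the pair list back-to-front from the invariant that the last move's flag is True (alternative decomposition; equivalence of return values proved below).


-- ===== PORT A =====
-- for-loop over range(1, len) carrying (refined_game_list, victor_flag), flag toggled each step
def refine_game_history (game_history : List Int) : List (Int × Int × Bool) :=
  ((PySem.List.pyRange 1 (game_history.length : Int) 1).foldl
    (fun st i =>
      (st.1 ++ [(PySem.List.pyGetD game_history (i - 1) 0,
                 PySem.List.pyGetD game_history i 0, st.2)], !st.2))
    ([], decide (((game_history.length : Int) - 1) % 2 = 1))).1

-- ===== PORT B =====
-- pairs = zip(gh, gh[1:]); iterate reversed(pairs) appending with a flag starting True and toggled; reverse at the end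
def refine_game_history_alt (game_history : List Int) : List (Int × Int × Bool) :=
  let pairs := game_history.zip (PySem.List.slice game_history (some 1) none)
  let r := pairs.reverse.foldl
    (fun st p => (st.1 ++ [(p.1, p.2, st.2)], !st.2)) ([], true)
  r.1.reverse

-- ===== PRECONDITION & SPEC =====
def Spec_refine_game_history (game_history : List Int) (out : List (Int × Int × Bool)) : Prop := out = refine_game_history_alt game_history
instance (game_history : List Int) (out : List (Int × Int × Bool)) : Decidable (Spec_refine_game_history game_history out) := by unfold Spec_refine_game_history; infer_instance

-- ===== CLAIM (what is proved, stated in full; the proofs are below) =====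
def Claim_equal_refine_game_history : Prop := ∀ (game_history : List Int), Dom_refine_game_history game_history → Spec_refine_game_history game_history (refine_game_history game_history)

-- ===== LEMMAS AND PROOFS =====

-- parity of (n-i) is the xor of the parities of (n-1) and (i-1)
theorem pv_parity (n i : Int) :
    (decide ((n - 1) % 2 = 1) ^^ decide ((i - 1) % 2 = 1)) = decide ((n - i) % 2 ≠ 0) := by
  by_cases h1 : (n - 1) % 2 = 1 <;> by_cases h2 : (i - 1) % 2 = 1 <;>
    simp [h1, h2] <;> omega

-- A-side loop invariant: the foldl over range(1, 1+k) produces the map with flags f ^^ parity(i-1)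
theorem pv_loopA (gh : List Int) (f : Bool) (k : Nat) :
    (PySem.List.pyRange 1 (1 + (k : Int)) 1).foldl
      (fun st i =>
        (st.1 ++ [(PySem.List.pyGetD gh (i - 1) 0,
                   PySem.List.pyGetD gh i 0, st.2)], !st.2)) ([], f)
    = ((PySem.List.pyRange 1 (1 + (k : Int)) 1).map
        (fun i => (PySem.List.pyGetD gh (i - 1) 0,
                   PySem.List.pyGetD gh i 0, f ^^ decide ((i - 1) % 2 = 1))),
       f ^^ decide ((k : Int) % 2 = 1)) := by
  induction k with
  | zero => simp [PySem.List.pyRange_one_eq_nil]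
  | succ m ih =>
    push_cast
    have hsplit : PySem.List.pyRange 1 (1 + ((m : Int) + 1)) 1
        = PySem.List.pyRange 1 (1 + (m : Int)) 1 ++ [1 + (m : Int)] := by
      have h : (1 : Int) + ((m : Int) + 1) = (1 + (m : Int)) + 1 := by ring
      rw [h, PySem.List.pyRange_one_succ_right (by omega)]
    have h1 : (1 : Int) + (m : Int) - 1 = (m : Int) := by ring
    rw [hsplit, List.foldl_append, List.map_append, ih]
    simp only [List.foldl_cons, List.foldl_nil, List.map_cons, List.map_nil, h1,
      Prod.mk.injEq]
    refine ⟨trivial, ?_⟩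
    cases f <;> by_cases h : (m : Int) % 2 = 1 <;> simp [h] <;> omega

-- B-side loop invariant: folding over the reversed pair list with a toggled flag
-- accumulates the reversed mapIdx with flags read off from the distance to the end
theorem pv_loopB (ps : List (Int × Int)) (f : Bool) :
    ps.reverse.foldl (fun st p => (st.1 ++ [(p.1, p.2, st.2)], !st.2)) ([], f)
    = ((ps.mapIdx (fun j p => (p.1, p.2, f ^^ decide ((ps.length - 1 - j) % 2 = 1)))).reverse,
       f ^^ decide (ps.length % 2 = 1)) := by
  induction ps with
  | nil => simp
  | cons p ps ih =>
    have hrev : (p :: ps).reverse = ps.reverse ++ [p] := by simp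
    rw [hrev, List.foldl_append, ih]
    simp only [List.foldl_cons, List.foldl_nil, List.mapIdx_cons, List.length_cons,
      List.reverse_cons, Prod.mk.injEq]
    refine ⟨?_, ?_⟩
    · congr 1
      · refine congrArg List.reverse ?_
        apply List.ext_getElem (by simp)
        intro i hi1 hi2
        simp only [List.getElem_mapIdx,
          show ps.length + 1 - 1 - (i + 1) = ps.length - 1 - i from by omega]
    · cases f <;> by_cases h : ps.length % 2 = 1 <;> simp [h] <;> omega

theorem pv_main (gh : List Int) :
    refine_game_history gh = refine_game_history_alt gh := by
  unfold refine_game_history refine_game_history_alt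
  rw [PySem.List.slice_from_one]
  dsimp only
  rw [pv_loopB]
  simp only [List.reverse_reverse]
  by_cases hnil : gh = []
  · subst hnil; simp [PySem.List.pyRange_one_eq_nil]
  · have hpos : 0 < gh.length := List.length_pos_iff.mpr hnil
    set n : Int := (gh.length : Int) with hn
    have hk : n = 1 + (((n - 1).toNat : Nat) : Int) := by omega
    rw [hk, pv_loopA]
    simp only []
    apply List.ext_getElem
    · simp [PySem.List.length_pyRange_one, List.length_zip, List.length_tail]
      omega
    · intro k hk1 hk2
      have hklt : k < gh.length - 1 := by
        simpa [List.length_zip, List.length_tail] using hk2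
      rw [List.getElem_map, PySem.List.getElem_pyRange_one, List.getElem_mapIdx,
        List.getElem_zip]
      have hg1 : PySem.List.pyGetD gh ((1 : Int) + k - 1) 0 = gh[k]'(by omega) := by
        have : (1 : Int) + k - 1 = (k : Int) := by ring
        rw [this, PySem.List.pyGetD_natCast]
        exact List.getD_eq_getElem gh 0 (by omega)
      have hg2 : PySem.List.pyGetD gh ((1 : Int) + k) 0 = gh[k + 1]'(by omega) := by
        have : (1 : Int) + k = ((k + 1 : Nat) : Int) := by push_cast; ring
        rw [this, PySem.List.pyGetD_natCast]
        exact List.getD_eq_getElem gh 0 (by omega)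
      have hg3 : gh.tail[k]'(by simp [List.length_tail]; omega) = gh[k + 1]'(by omega) := by
        rw [List.getElem_tail]
      rw [hg1, hg3]
      refine Prod.ext rfl (Prod.ext ?_ ?_)
      · simpa using hg2
      · simp only []
        rw [pv_parity]
        have hlen : (gh.zip gh.tail).length = gh.length - 1 := by
          simp [List.length_zip, List.length_tail]
      -- parity arithmetic: (n - (1+k)) odd ↔ (len-1-1-k) odd with Nat subtraction
        rw [hlen]
        by_cases h : (gh.length - 1 - 1 - k) % 2 = 1 <;> simp [h] <;> omega

-- ===== VERDICT (by name: the statement is the Claim_ definition above) =====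
theorem refine_game_history_spec : Claim_equal_refine_game_history := by
  intro gh _
  unfold Spec_refine_game_history
  exact pv_main gh
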